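-- pv_equiv track=rewrite | github.com/pc0618/Sudoku-Mech-Interp | sudoku_solver.py | find_naked_pairs
-- ===== SOURCE A (Python) =====
-- from typing import List, Set, Tuple, Optional, Dict
--
-- def find_naked_pairs(units: List[Set[int]]) -> List[Tuple[int, int, List[int]]]:
--     pairs = []
--     value_to_indices = {}
--     for idx, cell in enumerate(units):
--         if len(cell) == 2:
--             key = tuple(sorted(cell))
--             value_to_indices.setdefault(key, []).append(idx)
--     for pair, indices in value_to_indices.items():
--         if len(indices) == 2:
--             pairs.append((pair[0], pair[1], indices))
--     return pairs
-- ===== SOURCE B (Python) =====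
-- def find_naked_pairs(units):
--     # Dict-free alternative: precompute the sorted key of every two-candidate
--     # cell, then for each first occurrence of a key scan for all its cells.
--     cells2 = [(tuple(sorted(c)), i) for i, c in enumerate(units) if len(c) == 2]
--     result = []
--     for pos, (key, _i) in enumerate(cells2):
--         if any(k == key for k, _ in cells2[:pos]):
--             continue
--         indices = [j for k, j in cells2 if k == key]
--         if len(indices) == 2:
--             result.append((key[0], key[1], indices))
--     return result
-- ===== Notes on version B (the rewrite author's own statement) =====
-- stated objective: alternative
-- what changed: Replaces the grouping dict with a dict-free nested scan: candidate (key,index) pairs are precomputed once, each key is handled at its first occurrence (skipping keys seen in the prefix) by scanning the candidate list for all matching indices.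
import Mathlib
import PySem

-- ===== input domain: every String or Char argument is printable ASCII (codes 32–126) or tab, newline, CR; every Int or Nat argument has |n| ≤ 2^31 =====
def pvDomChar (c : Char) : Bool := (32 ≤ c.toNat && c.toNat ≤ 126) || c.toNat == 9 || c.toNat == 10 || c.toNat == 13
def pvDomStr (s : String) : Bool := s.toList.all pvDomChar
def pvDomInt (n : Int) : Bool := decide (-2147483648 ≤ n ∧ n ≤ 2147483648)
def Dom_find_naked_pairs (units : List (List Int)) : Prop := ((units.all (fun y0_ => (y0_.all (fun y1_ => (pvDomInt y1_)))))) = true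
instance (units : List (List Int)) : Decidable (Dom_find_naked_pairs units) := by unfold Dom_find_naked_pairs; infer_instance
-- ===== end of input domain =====

-- B replaces A's grouping dict by a dict-free nested scan over a precomputed candidate list (alternative decomposition, not faster).


-- ===== PORT A =====
-- each inner List Int is the Python set of candidates (distinct elements);
-- pair[0]/pair[1] are ported with pyGetD (every dict key has length 2, so no IndexError is reachable)
def find_naked_pairs (units : List (List Int)) : List (Int × Int × List Int) :=
  let vti : PySem.Dict (List Int) (List Int) :=
    (PySem.List.enumerate units).foldl
      (fun d p =>
        if p.2.length = 2 then
          d.modify (PySem.List.sorted p.2 (fun x => x) false) [] (fun l => l ++ [p.1])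
        else d)
      PySem.Dict.empty
  vti.items.foldl
    (fun pairs q =>
      if q.2.length = 2 then
        pairs ++ [(PySem.List.pyGetD q.1 0 0, PySem.List.pyGetD q.1 1 0, q.2)]
      else pairs)
    []

-- ===== PORT B =====
-- port of Source B: cells2 is the precomputed candidate list; the slice is cells2[:pos]
def find_naked_pairs_alt (units : List (List Int)) : List (Int × Int × List Int) :=
  let cells2 : List (List Int × Int) :=
    ((PySem.List.enumerate units).filter (fun p => p.2.length = 2)).map
      (fun p => (PySem.List.sorted p.2 (fun x => x) false, p.1))
  (PySem.List.enumerate cells2).foldl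
    (fun result q =>
      if (PySem.List.slice cells2 none (some q.1)).any (fun r => r.1 == q.2.1) then result
      else
        let indices := (cells2.filter (fun r => r.1 == q.2.1)).map (fun r => r.2)
        if indices.length = 2 then
          result ++ [(PySem.List.pyGetD q.2.1 0 0, PySem.List.pyGetD q.2.1 1 0, indices)]
        else result)
    []

-- ===== PRECONDITION & SPEC =====
def Spec_find_naked_pairs (units : List (List Int)) (out : List (Int × Int × List Int)) : Prop := out = find_naked_pairs_alt units
instance (units : List (List Int)) (out : List (Int × Int × List Int)) : Decidable (Spec_find_naked_pairs units out) := by unfold Spec_find_naked_pairs; infer_instance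

-- ===== CLAIM (what is proved, stated in full; the proofs are below) =====
def Claim_equal_find_naked_pairs : Prop := ∀ (units : List (List Int)), Dom_find_naked_pairs units → Spec_find_naked_pairs units (find_naked_pairs units)

-- ===== LEMMAS AND PROOFS =====

-- first occurrences among `rest` that are not already in `seen`, in order
def firstKeys {κ : Type} [BEq κ] : List κ → List κ → List κ
| _, [] => []
| seen, r :: t => if seen.contains r then firstKeys seen t else r :: firstKeys (r :: seen) t

-- the group emitted for one key: its matching indices, kept only when there are exactly two
def outF (kl : List (List Int × Int)) (k : List Int) : List (Int × Int × List Int) :=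
  if ((kl.filter (fun r => r.1 == k)).map (fun r => r.2)).length = 2
  then [(PySem.List.pyGetD k 0 0, PySem.List.pyGetD k 1 0,
         (kl.filter (fun r => r.1 == k)).map (fun r => r.2))]
  else []

theorem firstKeys_congr {κ : Type} [BEq κ] (rest : List κ) :
    ∀ (seen seen' : List κ), (∀ k, seen.contains k = seen'.contains k) →
      firstKeys seen rest = firstKeys seen' rest := by
  induction rest with
  | nil => intro _ _ _; rfl
  | cons r t ih =>
    intro seen seen' h
    simp only [firstKeys, h r]
    by_cases hc : seen'.contains r = true
    · simp [hc, ih seen seen' h]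
    · simp only [hc]
      have : ∀ k, (r :: seen).contains k = (r :: seen').contains k := by
        intro k; simp [List.contains_cons, h k]
      simp [ih _ _ this]

theorem set_update_eq_firstKeys {κ : Type} [BEq κ] [LawfulBEq κ] (ks : List κ) :
    ∀ (s : List κ), PySem.Set.update s ks = s ++ firstKeys s ks := by
  induction ks with
  | nil => intro s; simp [PySem.Set.update, firstKeys]
  | cons r t ih =>
    intro s
    have hstep : PySem.Set.update s (r :: t) = PySem.Set.update (PySem.Set.add s r) t := by
      simp [PySem.Set.update]
    rw [hstep]
    by_cases hc : s.contains r = true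
    · have hm : r ∈ s := by simpa using hc
      have : PySem.Set.add s r = s := by simp [PySem.Set.add, hm]
      rw [this, ih s]
      simp [firstKeys, hm]
    · have hm : r ∉ s := by simpa using hc
      have hadd : PySem.Set.add s r = s ++ [r] := by simp [PySem.Set.add, hm]
      rw [hadd, ih (s ++ [r])]
      have hcg : firstKeys (s ++ [r]) t = firstKeys (r :: s) t := by
        apply firstKeys_congr
        intro k
        simp only [List.contains_append, List.contains_cons]
        cases h1 : s.contains k <;> simp_all [Bool.or_comm]
      simp [firstKeys, hm, hcg]

theorem B_loop {α β κ : Type} [BEq κ] [LawfulBEq κ] (g : α → κ) (F : κ → List β) (L : List α)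
    (rest : List α) :
    ∀ (pre : List α) (acc : List β), L = pre ++ rest →
      (PySem.List.enumerate rest (pre.length : Int)).foldl
        (fun res q =>
          if (PySem.List.slice L none (some q.1)).any (fun r => g r == g q.2) then res
          else res ++ F (g q.2)) acc
      = acc ++ (firstKeys (pre.map g) (rest.map g)).flatMap F := by
  induction rest with
  | nil => intro pre acc _; simp [PySem.List.enumerate, firstKeys]
  | cons r t ih =>
    intro pre acc hL
    rw [PySem.List.enumerate_cons]
    have hslice : PySem.List.slice L none (some (pre.length : Int)) = pre := by
      rw [PySem.List.slice_to_natCast, hL, List.take_left]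
    have hcond : (PySem.List.slice L none (some (pre.length : Int))).any (fun x => g x == g r)
        = (pre.map g).contains (g r) := by
      rw [hslice, ← List.any_beq' (l := pre.map g) (a := g r), List.any_map]
      rfl
    have hlen : (pre.length : Int) + 1 = ((pre ++ [r]).length : Int) := by simp
    have hL' : L = (pre ++ [r]) ++ t := by simp [hL]
    have hcongr : firstKeys ((pre ++ [r]).map g) (t.map g)
        = firstKeys (g r :: pre.map g) (t.map g) := by
      apply firstKeys_congr
      intro k
      simp only [List.map_append, List.map_cons, List.map_nil, List.contains_append,
        List.contains_cons]
      cases h1 : (pre.map g).contains k <;> simp_all [Bool.or_comm]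
    simp only [List.foldl_cons, hcond]
    by_cases hc : (pre.map g).contains (g r) = true
    · have hdrop : firstKeys (g r :: pre.map g) (t.map g) = firstKeys (pre.map g) (t.map g) := by
        apply firstKeys_congr
        intro k
        by_cases hk : k = g r
        · subst hk
          simp only [List.contains_cons, BEq.rfl, Bool.true_or]
          simpa using hc
        · simp [hk]
      rw [if_pos hc, hlen, ih (pre ++ [r]) acc hL', hcongr, hdrop]
      simp only [List.map_cons, firstKeys]
      rw [if_pos hc]
    · rw [if_neg hc, hlen, ih (pre ++ [r]) (acc ++ F (g r)) hL', hcongr]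
      simp only [List.map_cons, firstKeys]
      rw [if_neg hc]
      simp

theorem items_eq_keys_map {κ ν : Type} [BEq κ] [LawfulBEq κ] (d : PySem.Dict κ ν) (d0 : ν)
    (h : d.keys.Nodup) : d.items = d.keys.map (fun k => (k, d.getD k d0)) := by
  simp only [PySem.Dict.keys, List.map_map]
  have : ∀ p ∈ d.items, ((fun k => (k, d.getD k d0)) ∘ Prod.fst) p = id p := by
    intro p hp
    have hp' : (p.1, p.2) ∈ d.items := by simpa using hp
    have hv : d.getD p.1 d0 = p.2 := PySem.Dict.getD_of_mem_items (d := d) (d0 := d0) hp' h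
    simp [hv]
  rw [List.map_congr_left this, List.map_id]

theorem items_fold (GD : List Int → List Int) (K : List (List Int)) :
    ∀ (acc : List (Int × Int × List Int)),
      (K.map (fun k => (k, GD k))).foldl
        (fun pairs q =>
          if q.2.length = 2 then
            pairs ++ [(PySem.List.pyGetD q.1 0 0, PySem.List.pyGetD q.1 1 0, q.2)]
          else pairs) acc
      = acc ++ K.flatMap (fun k =>
          if (GD k).length = 2
          then [(PySem.List.pyGetD k 0 0, PySem.List.pyGetD k 1 0, GD k)] else []) := by
  induction K with
  | nil => intro acc; simp
  | cons k K ih =>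
    intro acc
    simp only [List.map_cons, List.foldl_cons, List.flatMap_cons]
    by_cases h2 : (GD k).length = 2
    · rw [if_pos h2, if_pos h2, ih]
      simp
    · rw [if_neg h2, if_neg h2, ih]
      simp

-- ===== VERDICT (by name: the statement is the Claim_ definition above) =====
theorem find_naked_pairs_alt_eq (units : List (List Int)) :
    find_naked_pairs_alt units
      = (firstKeys ([] : List (List Int))
          ((((PySem.List.enumerate units).filter (fun p => p.2.length = 2)).map
              (fun p => (PySem.List.sorted p.2 (fun x => x) false, p.1))).map
            (fun r => r.1))).flatMap
          (outF (((PySem.List.enumerate units).filter (fun p => p.2.length = 2)).map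
              (fun p => (PySem.List.sorted p.2 (fun x => x) false, p.1)))) := by
  set kl := ((PySem.List.enumerate units).filter (fun p => p.2.length = 2)).map
      (fun p => (PySem.List.sorted p.2 (fun x => x) false, p.1)) with hkl
  have hbody : (fun (result : List (Int × Int × List Int)) (q : Int × List Int × Int) =>
        if (PySem.List.slice kl none (some q.1)).any (fun r => r.1 == q.2.1) then result
        else
          let indices := (kl.filter (fun r => r.1 == q.2.1)).map (fun r => r.2)
          if indices.length = 2 then
            result ++ [(PySem.List.pyGetD q.2.1 0 0, PySem.List.pyGetD q.2.1 1 0, indices)]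
          else result)
      = (fun res q =>
          if (PySem.List.slice kl none (some q.1)).any
              (fun r => (fun x : List Int × Int => x.1) r == (fun x : List Int × Int => x.1) q.2)
            then res
          else res ++ outF kl ((fun x : List Int × Int => x.1) q.2)) := by
    funext res q
    dsimp only [outF]
    by_cases h1 : (PySem.List.slice kl none (some q.1)).any (fun r => r.1 == q.2.1) = true
    · rw [if_pos h1, if_pos h1]
    · rw [if_neg h1, if_neg h1]
      by_cases h2 : ((kl.filter (fun r => r.1 == q.2.1)).map (fun r => r.2)).length = 2
      · rw [if_pos h2, if_pos h2]
      · rw [if_neg h2, if_neg h2]; simp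
  have hstart : find_naked_pairs_alt units
      = (PySem.List.enumerate kl).foldl
          (fun (result : List (Int × Int × List Int)) (q : Int × List Int × Int) =>
            if (PySem.List.slice kl none (some q.1)).any (fun r => r.1 == q.2.1) then result
            else
              let indices := (kl.filter (fun r => r.1 == q.2.1)).map (fun r => r.2)
              if indices.length = 2 then
                result ++ [(PySem.List.pyGetD q.2.1 0 0, PySem.List.pyGetD q.2.1 1 0, indices)]
              else result)
          [] := rfl
  rw [hstart, hbody]
  have hB := B_loop (fun x : List Int × Int => x.1) (outF kl) kl kl [] []
    (List.nil_append kl).symm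
  simp only [List.length_nil, Nat.cast_zero, List.map_nil, List.nil_append] at hB
  exact hB

theorem find_naked_pairs_eq (units : List (List Int)) :
    find_naked_pairs units
      = (firstKeys ([] : List (List Int))
          ((((PySem.List.enumerate units).filter (fun p => p.2.length = 2)).map
              (fun p => (PySem.List.sorted p.2 (fun x => x) false, p.1))).map
            (fun r => r.1))).flatMap
          (outF (((PySem.List.enumerate units).filter (fun p => p.2.length = 2)).map
              (fun p => (PySem.List.sorted p.2 (fun x => x) false, p.1)))) := by
  set kl := ((PySem.List.enumerate units).filter (fun p => p.2.length = 2)).map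
      (fun p => (PySem.List.sorted p.2 (fun x => x) false, p.1)) with hkl
  have hd : (PySem.List.enumerate units).foldl
      (fun d p =>
        if p.2.length = 2 then
          d.modify (PySem.List.sorted p.2 (fun x => x) false) [] (fun l => l ++ [p.1])
        else d)
      PySem.Dict.empty
      = kl.foldl (fun d r => d.modify r.1 [] (fun l => l ++ [r.2])) PySem.Dict.empty := by
    rw [hkl, List.foldl_map, List.foldl_filter]
    have : (fun (d : PySem.Dict (List Int) (List Int)) (p : Int × List Int) =>
        if (fun p : Int × List Int => decide (p.2.length = 2)) p = true then
          (fun d (r : List Int × Int) => d.modify r.1 [] (fun l => l ++ [r.2])) d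
            ((fun p : Int × List Int => (PySem.List.sorted p.2 (fun x => x) false, p.1)) p)
        else d)
      = (fun d p =>
          if p.2.length = 2 then
            d.modify (PySem.List.sorted p.2 (fun x => x) false) [] (fun l => l ++ [p.1])
          else d) := by
      funext d p
      by_cases h : p.2.length = 2 <;> simp [h]
    rw [this]
  set dct := kl.foldl (fun d r => d.modify r.1 [] (fun l => l ++ [r.2])) PySem.Dict.empty
    with hdct
  have hnodup : dct.keys.Nodup := by
    rw [hdct]
    exact PySem.Dict.nodup_keys_foldl_modify_key kl (fun r => r.1) []
      (fun _ r => (fun l => l ++ [r.2])) PySem.Dict.empty PySem.Dict.nodup_keys_empty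
  have hkeys : dct.keys = PySem.Set.update ([] : List (List Int)) (kl.map (fun r => r.1)) := by
    rw [hdct, PySem.Dict.keys_foldl_modify_key, PySem.Dict.keys_empty]
  have hgd : ∀ k, dct.getD k [] = (kl.filter (fun r => r.1 == k)).map (fun r => r.2) := by
    intro k
    rw [hdct, PySem.Dict.getD_foldl_modify_append, PySem.Dict.getD_empty]
    simp
  have hstart : find_naked_pairs units
      = ((PySem.List.enumerate units).foldl
          (fun d p =>
            if p.2.length = 2 then
              d.modify (PySem.List.sorted p.2 (fun x => x) false) [] (fun l => l ++ [p.1])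
            else d)
          PySem.Dict.empty).items.foldl
          (fun pairs q =>
            if q.2.length = 2 then
              pairs ++ [(PySem.List.pyGetD q.1 0 0, PySem.List.pyGetD q.1 1 0, q.2)]
            else pairs)
          [] := rfl
  rw [hstart, hd, items_eq_keys_map dct [] hnodup, items_fold (fun k => dct.getD k []) dct.keys []]
  have hfun : (fun k => if (dct.getD k []).length = 2
        then [(PySem.List.pyGetD k 0 0, PySem.List.pyGetD k 1 0, dct.getD k [])] else [])
      = outF kl := by
    funext k
    rw [outF, hgd k]
  rw [List.nil_append, hfun, hkeys, set_update_eq_firstKeys, List.nil_append]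

theorem find_naked_pairs_spec : Claim_equal_find_naked_pairs := by
  intro units _
  unfold Spec_find_naked_pairs
  rw [find_naked_pairs_eq, find_naked_pairs_alt_eq]
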